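-- pv_equiv track=rewrite | github.com/tad1/Mandarin_Pronunciation_Recognition_Project | src/get_info.py | extract_sequences
-- ===== SOURCE A (Python) =====
-- def extract_sequences(data):
--     sequences = []
--     current_seq = []
--
--     for item in data:
--         if item is not None:
--             current_seq.append(item)
--         else:
--             if current_seq:
--                 sequences.append(current_seq)
--                 current_seq = []
--     if current_seq:
--         sequences.append(current_seq)
--
--     return sequences
-- ===== SOURCE B (Python) =====
-- from itertools import groupby
--
--
-- def extract_sequences(data):
--     return [list(g) for k, g in groupby(data, key=lambda x: x is not None) if k]
-- ===== Notes on version B (the rewrite author's own statement) =====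
-- stated objective: idiomatic
-- what changed: Replaces the explicit accumulator loop with itertools.groupby keyed on 'is not None', keeping exactly the non-None groups.
import Mathlib
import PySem

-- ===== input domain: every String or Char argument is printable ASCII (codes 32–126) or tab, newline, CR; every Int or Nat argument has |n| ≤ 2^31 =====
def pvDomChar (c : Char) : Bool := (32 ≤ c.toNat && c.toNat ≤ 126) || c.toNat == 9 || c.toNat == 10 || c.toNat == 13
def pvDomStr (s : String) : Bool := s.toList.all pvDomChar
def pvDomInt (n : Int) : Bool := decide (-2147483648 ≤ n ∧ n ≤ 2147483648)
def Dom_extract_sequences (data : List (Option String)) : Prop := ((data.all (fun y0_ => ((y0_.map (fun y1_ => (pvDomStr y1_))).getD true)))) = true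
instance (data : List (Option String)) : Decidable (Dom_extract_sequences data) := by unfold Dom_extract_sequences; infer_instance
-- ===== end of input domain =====

-- B replaces A's explicit accumulator loop with a groupby-style split: take each
-- maximal run of non-None items, skip None runs (objective: idiomatic).


-- ===== PORT A =====
-- Literal port: fold over data with state (sequences, current_seq), then flush.
def extract_sequences (data : List (Option String)) : List (List String) :=
  let st := data.foldl
    (fun (st : List (List String) × List String) item =>
      match item with
      | some s => (st.1, st.2 ++ [s])
      | none => if st.2 ≠ [] then (st.1 ++ [st.2], []) else st)
    ([], [])
  if st.2 ≠ [] then st.1 ++ [st.2] else st.1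

-- ===== PORT B =====
-- groupby on 'is not None': each some-headed prefix is one group (a run); None
-- groups are skipped. takeWhile/dropWhile cut the maximal run, reduceOption
-- strips the some constructors.
def extract_sequences_alt (data : List (Option String)) : List (List String) :=
  match data with
  | [] => []
  | none :: t => extract_sequences_alt t
  | some s :: t =>
      (s :: (t.takeWhile Option.isSome).reduceOption) ::
        extract_sequences_alt (t.dropWhile Option.isSome)
termination_by data.length
decreasing_by
  · simp
  · have := List.length_dropWhile_le (p := Option.isSome) (l := t)
    simp; omega

-- ===== PRECONDITION & SPEC =====
def Spec_extract_sequences (data : List (Option String)) (out : List (List String)) : Prop := out = extract_sequences_alt data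
instance (data : List (Option String)) (out : List (List String)) : Decidable (Spec_extract_sequences data out) := by unfold Spec_extract_sequences; infer_instance

-- ===== CLAIM (what is proved, stated in full; the proofs are below) =====
def Claim_equal_extract_sequences : Prop := ∀ (data : List (Option String)), Dom_extract_sequences data → Spec_extract_sequences data (extract_sequences data)

-- ===== LEMMAS AND PROOFS =====

-- reference recursion mirroring A's loop state (current run only)
def esAux (cur : List String) : List (Option String) → List (List String)
  | [] => if cur = [] then [] else [cur]
  | none :: t => if cur = [] then esAux [] t else cur :: esAux [] t
  | some s :: t => esAux (cur ++ [s]) t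

theorem esAux_foldl (data : List (Option String)) :
    ∀ (acc : List (List String)) (cur : List String),
    (let st := data.foldl
        (fun (st : List (List String) × List String) item =>
          match item with
          | some s => (st.1, st.2 ++ [s])
          | none => if st.2 ≠ [] then (st.1 ++ [st.2], []) else st)
        (acc, cur)
     if st.2 ≠ [] then st.1 ++ [st.2] else st.1) = acc ++ esAux cur data := by
  induction data with
  | nil =>
      intro acc cur
      simp only [List.foldl, esAux]
      by_cases h : cur = [] <;> simp [h]
  | cons x t ih =>
      intro acc cur
      cases x with
      | some s => simpa [esAux] using ih acc (cur ++ [s])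
      | none =>
          by_cases h : cur = []
          · simpa [esAux, h] using ih acc []
          · simpa [esAux, h, List.append_assoc] using ih (acc ++ [cur]) []

theorem esAux_alt (data : List (Option String)) :
    ∀ (cur : List String),
    esAux cur data =
      if cur = [] then extract_sequences_alt data
      else (cur ++ (data.takeWhile Option.isSome).reduceOption) ::
        extract_sequences_alt (data.dropWhile Option.isSome) := by
  induction data with
  | nil =>
      intro cur
      by_cases h : cur = [] <;> simp [esAux, extract_sequences_alt, h]
  | cons x t ih =>
      intro cur
      cases x with
      | none =>
          by_cases h : cur = [] <;>
            simp [esAux, h, extract_sequences_alt, ih [], List.takeWhile, List.dropWhile]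
      | some s =>
          have ih' := ih (cur ++ [s])
          simp only [esAux, ih']
          by_cases h : cur = [] <;>
            simp [h, extract_sequences_alt, List.takeWhile, List.dropWhile,
              List.reduceOption, List.append_assoc]

-- ===== VERDICT (by name: the statement is the Claim_ definition above) =====
theorem extract_sequences_spec : Claim_equal_extract_sequences := by
  intro data _
  unfold Spec_extract_sequences extract_sequences
  have h := esAux_foldl data [] []
  simp only [List.nil_append] at h
  rw [h, esAux_alt data []]
  simp
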